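-- pv_equiv track=rewrite | github.com/takiyu/dotfiles | dotfiles/.config/sway/swayhelper/swayhelper/helper.py | _strip_reorder_tmp_prefix
-- ===== SOURCE A (Python) =====
-- _WS_REORDER_TMP = '__swh_tmp_'
--
-- _WS_SETUP_TMP = '__ws_'
--
-- def _strip_reorder_tmp_prefix(name: str) -> str:
--     # Strip all reorder temp prefixes
--     # (_WS_REORDER_TMP, _WS_SETUP_TMP, legacy _t).
--     prev = None
--     while prev != name:
--         prev = name
--         for prefix in (_WS_REORDER_TMP, _WS_SETUP_TMP, '_t'):
--             if name.startswith(prefix):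
--                 name = name[len(prefix):]
--     return name
-- ===== SOURCE B (Python) =====
-- _WS_REORDER_TMP = '__swh_tmp_'
--
-- _WS_SETUP_TMP = '__ws_'
--
-- def _strip_reorder_tmp_prefix(name: str) -> str:
--     # Single left-to-right scan: advance an offset past each temp prefix,
--     # never reslicing the string until the final return.
--     i = 0
--     while True:
--         for prefix in (_WS_REORDER_TMP, _WS_SETUP_TMP, '_t'):
--             if name.startswith(prefix, i):
--                 i += len(prefix)
--                 break
--         else:
--             return name[i:]
-- ===== Notes on version B (the rewrite author's own statement) =====
-- stated objective: faster
-- what changed: Replaces the fixpoint loop that repeatedly reslices the whole string (name = name[len(prefix):] until a pass changes nothing) with a single left-to-right scan that keeps an integer offset, tests each prefix at that offset via startswith(prefix, i), and slices once at the end.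
import Mathlib
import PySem

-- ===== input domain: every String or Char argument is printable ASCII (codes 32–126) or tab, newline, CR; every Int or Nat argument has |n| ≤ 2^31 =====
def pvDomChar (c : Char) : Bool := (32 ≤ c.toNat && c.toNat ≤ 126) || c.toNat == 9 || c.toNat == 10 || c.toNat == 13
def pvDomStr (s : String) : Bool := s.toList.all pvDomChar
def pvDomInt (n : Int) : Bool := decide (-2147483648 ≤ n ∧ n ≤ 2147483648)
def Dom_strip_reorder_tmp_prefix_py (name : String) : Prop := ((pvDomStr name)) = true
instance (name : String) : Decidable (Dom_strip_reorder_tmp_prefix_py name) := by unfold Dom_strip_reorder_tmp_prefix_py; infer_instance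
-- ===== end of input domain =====

-- B replaces A's fixpoint loop (repeatedly reslicing the whole string) by one
-- left-to-right scan with an advancing offset, slicing once at the end (faster).

-- ===== PORT A =====
def pvP1 : List Char := "__swh_tmp_".toList   -- _WS_REORDER_TMP
def pvP2 : List Char := "__ws_".toList        -- _WS_SETUP_TMP
def pvP3 : List Char := "_t".toList           -- legacy '_t'

-- the body of A's 'for prefix in (...)' loop: one pass over the three prefixes
def stripA_pass (name : List Char) : List Char :=
  [pvP1, pvP2, pvP3].foldl
    (fun name pre =>
      if PySem.Chars.startswith name pre
      then PySem.List.slice name (some (pre.length : Int)) none   -- name[len(prefix):]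
      else name)
    name

-- needed by stripA_go's termination (the while loop runs only while the pass shrinks name)
theorem stripA_pass_lt (t : List Char) (h : stripA_pass t ≠ t) :
    (stripA_pass t).length < t.length := by
  have step : ∀ (q u : List Char), q ≠ [] →
      (if PySem.Chars.startswith u q
       then PySem.List.slice u (some (q.length : Int)) none else u) = u ∨
      (if PySem.Chars.startswith u q
       then PySem.List.slice u (some (q.length : Int)) none else u).length < u.length := by
    intro q u hq
    by_cases hs : PySem.Chars.startswith u q
    · right
      have hle := ((PySem.Chars.startswith_iff u q).mp hs).length_le
      have hq' : 0 < q.length := List.length_pos_iff.mpr hq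
      simp [hs, PySem.List.slice_from_natCast]
      omega
    · left; simp [hs]
  have stepLe : ∀ (q u : List Char),
      (if PySem.Chars.startswith u q
       then PySem.List.slice u (some (q.length : Int)) none else u).length ≤ u.length := by
    intro q u
    by_cases hs : PySem.Chars.startswith u q
    · simp [hs, PySem.List.slice_from_natCast]
    · simp [hs]
  have h1 := step pvP1 t (by decide)
  set u1 := (if PySem.Chars.startswith t pvP1
      then PySem.List.slice t (some (pvP1.length : Int)) none else t) with hu1
  have h2 := step pvP2 u1 (by decide)
  set u2 := (if PySem.Chars.startswith u1 pvP2
      then PySem.List.slice u1 (some (pvP2.length : Int)) none else u1) with hu2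
  have h3 := step pvP3 u2 (by decide)
  set u3 := (if PySem.Chars.startswith u2 pvP3
      then PySem.List.slice u2 (some (pvP3.length : Int)) none else u2) with hu3
  have hpass : stripA_pass t = u3 := by
    simp only [stripA_pass, List.foldl, hu1, hu2, hu3]
  have l1 := stepLe pvP1 t
  have l2 := stepLe pvP2 u1
  have l3 := stepLe pvP3 u2
  rw [← hu1] at l1
  rw [← hu2] at l2
  rw [← hu3] at l3
  rw [hpass]
  rw [hpass] at h
  rcases h1 with h1 | h1 <;> rcases h2 with h2 | h2 <;> rcases h3 with h3 | h3 <;>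
    first
      | (exfalso; apply h; rw [h3, h2, h1])
      | omega

-- A's 'while prev != name' fixpoint loop
def stripA_go (name : List Char) : List Char :=
  if h : stripA_pass name = name then name else stripA_go (stripA_pass name)
termination_by name.length
decreasing_by exact stripA_pass_lt name h

def strip_reorder_tmp_prefix_py (name : String) : String :=
  String.ofList (stripA_go name.toList)

-- ===== PORT B =====
-- needed by stripB_go's termination
theorem stripB_advance (t : List Char) (i : Nat) (q : List Char)
    (h : PySem.Chars.startswith (t.drop i) q = true) : q.length ≤ t.length - i := by
  have := ((PySem.Chars.startswith_iff (t.drop i) q).mp h).length_le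
  simpa using this

-- Source B's single scan; name.startswith(prefix, i) is ported as the prefix test on
-- name.drop i, exact here since 0 ≤ i always
def stripB_go (name : List Char) (i : Nat) : List Char :=
  if h1 : PySem.Chars.startswith (name.drop i) pvP1 then stripB_go name (i + pvP1.length)
  else if h2 : PySem.Chars.startswith (name.drop i) pvP2 then stripB_go name (i + pvP2.length)
  else if h3 : PySem.Chars.startswith (name.drop i) pvP3 then stripB_go name (i + pvP3.length)
  else PySem.List.slice name (some (i : Int)) none    -- name[i:]
termination_by name.length - i
decreasing_by
  · have h := stripB_advance name i pvP1 h1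
    have e : pvP1.length = 10 := by decide
    rw [e] at h ⊢; omega
  · have h := stripB_advance name i pvP2 h2
    have e : pvP2.length = 5 := by decide
    rw [e] at h ⊢; omega
  · have h := stripB_advance name i pvP3 h3
    have e : pvP3.length = 2 := by decide
    rw [e] at h ⊢; omega

def strip_reorder_tmp_prefix_py_alt (name : String) : String :=
  String.ofList (stripB_go name.toList 0)

-- ===== PRECONDITION & SPEC =====
def Spec_strip_reorder_tmp_prefix_py (name : String) (out : String) : Prop := out = strip_reorder_tmp_prefix_py_alt name
instance (name : String) (out : String) : Decidable (Spec_strip_reorder_tmp_prefix_py name out) := by unfold Spec_strip_reorder_tmp_prefix_py; infer_instance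

-- ===== CLAIM (what is proved, stated in full; the proofs are below) =====
def Claim_equal_strip_reorder_tmp_prefix_py : Prop := ∀ (name : String), Dom_strip_reorder_tmp_prefix_py name → Spec_strip_reorder_tmp_prefix_py name (strip_reorder_tmp_prefix_py name)

-- ===== LEMMAS AND PROOFS =====

theorem startswith_nil_p1 : PySem.Chars.startswith ([] : List Char) pvP1 = false := by decide
theorem startswith_nil_p2 : PySem.Chars.startswith ([] : List Char) pvP2 = false := by decide
theorem startswith_nil_p3 : PySem.Chars.startswith ([] : List Char) pvP3 = false := by decide

-- each step of A's pass can only shorten the string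
theorem pv_stepLe (q u : List Char) :
    (if PySem.Chars.startswith u q
     then PySem.List.slice u (some (q.length : Int)) none else u).length ≤ u.length := by
  by_cases hs : PySem.Chars.startswith u q = true
  · simp [hs, PySem.List.slice_from_natCast]
  · simp [hs]

-- stripB_go name i only looks at name.drop i
theorem stripB_shift : ∀ (n : Nat) (t : List Char) (i : Nat), t.length - i ≤ n →
    stripB_go t i = stripB_go (t.drop i) 0 := by
  intro n
  induction n with
  | zero =>
    intro t i hn
    have hd : t.drop i = [] := List.drop_eq_nil_of_le (by omega)
    rw [hd]
    conv_lhs => rw [stripB_go]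
    conv_rhs => rw [stripB_go]
    simp [hd, startswith_nil_p1, startswith_nil_p2, startswith_nil_p3,
      PySem.List.slice_from_natCast]
  | succ n ih =>
    intro t i hn
    conv_lhs => rw [stripB_go]
    conv_rhs => rw [stripB_go]
    simp only [List.drop_zero, Nat.zero_add]
    by_cases c1 : PySem.Chars.startswith (t.drop i) pvP1 = true
    · have hl := stripB_advance t i pvP1 c1
      have e : pvP1.length = 10 := by decide
      rw [e] at hl
      simp only [c1, dite_true]
      rw [ih t (i + pvP1.length) (by rw [e]; omega),
          ih (t.drop i) pvP1.length (by rw [e]; simp; omega)]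
      rw [List.drop_drop]
    · by_cases c2 : PySem.Chars.startswith (t.drop i) pvP2 = true
      · have hl := stripB_advance t i pvP2 c2
        have e : pvP2.length = 5 := by decide
        rw [e] at hl
        simp only [c1, c2, dite_true, dite_false]
        rw [ih t (i + pvP2.length) (by rw [e]; omega),
            ih (t.drop i) pvP2.length (by rw [e]; simp; omega)]
        simp
      · by_cases c3 : PySem.Chars.startswith (t.drop i) pvP3 = true
        · have hl := stripB_advance t i pvP3 c3
          have e : pvP3.length = 2 := by decide
          rw [e] at hl
          simp only [c1, c2, c3, dite_true, dite_false]
          rw [ih t (i + pvP3.length) (by rw [e]; omega),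
              ih (t.drop i) pvP3.length (by rw [e]; simp; omega)]
          simp
        · simp only [c1, c2, c3, dite_false]
          simp [PySem.List.slice_from_natCast]

-- at most one of the three prefixes matches at a given position
theorem pv_mutex12 (t : List Char) (h : pvP2 <+: t) : ¬ pvP1 <+: t := by
  intro h1
  exact absurd (List.prefix_of_prefix_length_le h h1 (by decide)) (by decide)
theorem pv_mutex13 (t : List Char) (h : pvP3 <+: t) : ¬ pvP1 <+: t := by
  intro h1
  exact absurd (List.prefix_of_prefix_length_le h h1 (by decide)) (by decide)
theorem pv_mutex23 (t : List Char) (h : pvP3 <+: t) : ¬ pvP2 <+: t := by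
  intro h2
  exact absurd (List.prefix_of_prefix_length_le h h2 (by decide)) (by decide)

theorem stripB_strip1 (t : List Char) (h : pvP1 <+: t) :
    stripB_go t 0 = stripB_go (t.drop pvP1.length) 0 := by
  have c1 : PySem.Chars.startswith (t.drop 0) pvP1 = true := by
    simpa using (PySem.Chars.startswith_iff t pvP1).mpr h
  rw [stripB_go]
  simp only [c1, dite_true]
  rw [stripB_shift t.length t (0 + pvP1.length) (by omega)]
  simp

theorem stripB_strip2 (t : List Char) (h : pvP2 <+: t) :
    stripB_go t 0 = stripB_go (t.drop pvP2.length) 0 := by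
  have c1 : ¬ PySem.Chars.startswith (t.drop 0) pvP1 = true := by
    simpa using fun hc => pv_mutex12 t h ((PySem.Chars.startswith_iff t pvP1).mp hc)
  have c2 : PySem.Chars.startswith (t.drop 0) pvP2 = true := by
    simpa using (PySem.Chars.startswith_iff t pvP2).mpr h
  rw [stripB_go]
  simp only [c1, c2, dite_true, dite_false]
  rw [stripB_shift t.length t (0 + pvP2.length) (by omega)]
  simp

theorem stripB_strip3 (t : List Char) (h : pvP3 <+: t) :
    stripB_go t 0 = stripB_go (t.drop pvP3.length) 0 := by
  have c1 : ¬ PySem.Chars.startswith (t.drop 0) pvP1 = true := by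
    simpa using fun hc => pv_mutex13 t h ((PySem.Chars.startswith_iff t pvP1).mp hc)
  have c2 : ¬ PySem.Chars.startswith (t.drop 0) pvP2 = true := by
    simpa using fun hc => pv_mutex23 t h ((PySem.Chars.startswith_iff t pvP2).mp hc)
  have c3 : PySem.Chars.startswith (t.drop 0) pvP3 = true := by
    simpa using (PySem.Chars.startswith_iff t pvP3).mpr h
  rw [stripB_go]
  simp only [c1, c2, c3, dite_true, dite_false]
  rw [stripB_shift t.length t (0 + pvP3.length) (by omega)]
  simp

-- stripping one prefix (or nothing) does not change B's fixpoint
theorem stripB_step (q u : List Char) (hq : q = pvP1 ∨ q = pvP2 ∨ q = pvP3) :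
    stripB_go (if PySem.Chars.startswith u q
      then PySem.List.slice u (some (q.length : Int)) none else u) 0 = stripB_go u 0 := by
  by_cases hs : PySem.Chars.startswith u q = true
  · have hpre := (PySem.Chars.startswith_iff u q).mp hs
    simp only [hs, if_true, PySem.List.slice_from_natCast]
    rcases hq with rfl | rfl | rfl
    · exact (stripB_strip1 u hpre).symm
    · exact (stripB_strip2 u hpre).symm
    · exact (stripB_strip3 u hpre).symm
  · simp [hs]

theorem stripB_pass (t : List Char) : stripB_go (stripA_pass t) 0 = stripB_go t 0 := by
  set u1 := (if PySem.Chars.startswith t pvP1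
      then PySem.List.slice t (some (pvP1.length : Int)) none else t) with hu1
  set u2 := (if PySem.Chars.startswith u1 pvP2
      then PySem.List.slice u1 (some (pvP2.length : Int)) none else u1) with hu2
  have hpass : stripA_pass t = (if PySem.Chars.startswith u2 pvP3
      then PySem.List.slice u2 (some (pvP3.length : Int)) none else u2) := by
    simp only [stripA_pass, List.foldl, hu1, hu2]
  rw [hpass]
  rw [stripB_step pvP3 u2 (Or.inr (Or.inr rfl))]
  rw [hu2, stripB_step pvP2 u1 (Or.inr (Or.inl rfl))]
  rw [hu1, stripB_step pvP1 t (Or.inl rfl)]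

-- if one pass of A changes nothing, no prefix matches at all
theorem pass_self (t : List Char) (hp : stripA_pass t = t) :
    ¬ pvP1 <+: t ∧ ¬ pvP2 <+: t ∧ ¬ pvP3 <+: t := by
  set u1 := (if PySem.Chars.startswith t pvP1
      then PySem.List.slice t (some (pvP1.length : Int)) none else t) with hu1
  set u2 := (if PySem.Chars.startswith u1 pvP2
      then PySem.List.slice u1 (some (pvP2.length : Int)) none else u1) with hu2
  set u3 := (if PySem.Chars.startswith u2 pvP3
      then PySem.List.slice u2 (some (pvP3.length : Int)) none else u2) with hu3
  have hpass : stripA_pass t = u3 := by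
    simp only [stripA_pass, List.foldl, hu1, hu2, hu3]
  have hu3t : u3.length = t.length := by rw [← hpass, hp]
  have l2 : u2.length ≤ u1.length := by rw [hu2]; exact pv_stepLe pvP2 u1
  have l3 : u3.length ≤ u2.length := by rw [hu3]; exact pv_stepLe pvP3 u2
  have np1 : ¬ pvP1 <+: t := by
    intro h1
    have c : PySem.Chars.startswith t pvP1 = true := (PySem.Chars.startswith_iff t pvP1).mpr h1
    have hlen : (10 : Nat) ≤ t.length := by
      have := h1.length_le; simpa using this
    have : u1.length = t.length - 10 := by
      rw [hu1, if_pos c, PySem.List.slice_from_natCast]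
      simp [show pvP1.length = 10 from by decide]
    omega
  have e1 : u1 = t := by
    rw [hu1, if_neg (fun c => np1 ((PySem.Chars.startswith_iff t pvP1).mp c))]
  have np2 : ¬ pvP2 <+: t := by
    intro h2
    have c : PySem.Chars.startswith u1 pvP2 = true := by
      rw [e1]; exact (PySem.Chars.startswith_iff t pvP2).mpr h2
    have hlen : (5 : Nat) ≤ t.length := by
      have := h2.length_le; simpa using this
    have : u2.length = t.length - 5 := by
      rw [hu2, if_pos c, PySem.List.slice_from_natCast, e1]
      simp [show pvP2.length = 5 from by decide]
    omega
  have e2 : u2 = t := by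
    rw [hu2, e1, if_neg (fun c => np2 ((PySem.Chars.startswith_iff t pvP2).mp c))]
  have np3 : ¬ pvP3 <+: t := by
    intro h3
    have c : PySem.Chars.startswith u2 pvP3 = true := by
      rw [e2]; exact (PySem.Chars.startswith_iff t pvP3).mpr h3
    have hlen : (2 : Nat) ≤ t.length := by
      have := h3.length_le; simpa using this
    have : u3.length = t.length - 2 := by
      rw [hu3, if_pos c, PySem.List.slice_from_natCast, e2]
      simp [show pvP3.length = 2 from by decide]
    omega
  exact ⟨np1, np2, np3⟩

theorem strip_main : ∀ (n : Nat) (t : List Char), t.length ≤ n →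
    stripA_go t = stripB_go t 0 := by
  intro n
  induction n with
  | zero =>
    intro t hn
    have ht : t = [] := List.eq_nil_of_length_eq_zero (by omega)
    subst ht
    rw [stripA_go, stripB_go]
    have hp : stripA_pass ([] : List Char) = [] := by decide
    simp [hp, startswith_nil_p1, startswith_nil_p2, startswith_nil_p3]
  | succ n ih =>
    intro t hn
    rw [stripA_go]
    by_cases hp : stripA_pass t = t
    · simp only [hp, dite_true]
      obtain ⟨n1, n2, n3⟩ := pass_self t hp
      have c1 : ¬ PySem.Chars.startswith t pvP1 = true :=
        fun hc => n1 ((PySem.Chars.startswith_iff t pvP1).mp hc)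
      have c2 : ¬ PySem.Chars.startswith t pvP2 = true :=
        fun hc => n2 ((PySem.Chars.startswith_iff t pvP2).mp hc)
      have c3 : ¬ PySem.Chars.startswith t pvP3 = true :=
        fun hc => n3 ((PySem.Chars.startswith_iff t pvP3).mp hc)
      rw [stripB_go]
      simp [c1, c2, c3, PySem.List.slice_from_natCast]
    · simp only [hp, dite_false]
      have hlt := stripA_pass_lt t hp
      rw [ih (stripA_pass t) (by omega)]
      exact stripB_pass t

-- ===== VERDICT (by name: the statement is the Claim_ definition above) =====
theorem strip_reorder_tmp_prefix_py_spec : Claim_equal_strip_reorder_tmp_prefix_py := by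
  intro name _
  unfold Spec_strip_reorder_tmp_prefix_py strip_reorder_tmp_prefix_py strip_reorder_tmp_prefix_py_alt
  rw [strip_main name.toList.length name.toList le_rfl]
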